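-- pv_equiv track=rewrite | github.com/Ratatou2/Study | lotto.py | check
-- ===== SOURCE A (Python) =====
-- def check(list1, list2):
--     count = 0
--     special = 0
--     for i in list1:
--         for j in list2:
--             if i == j:
--                 count += 1
--
--     for i in list1:
--         if i == list2[-1] : special += 1
--
--     if count == 3: return 5000
--     elif count == 4: return 50000
--     elif special == 1 and count == 6: return 50000000
--     elif count == 5: return 1000000
--
--     elif count == 6: return 1000000000
-- ===== SOURCE B (Python) =====
-- def check(list1, list2):
--     # sort both lists and count cross-matches in one merge pass over the sorted copies
--     a = sorted(list1)
--     b = sorted(list2)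
--     count = 0
--     i = 0
--     j = 0
--     while i < len(a) and j < len(b):
--         if a[i] < b[j]:
--             i += 1
--         elif b[j] < a[i]:
--             j += 1
--         else:
--             v = a[i]
--             ca = 0
--             while i < len(a) and a[i] == v:
--                 ca += 1
--                 i += 1
--             cb = 0
--             while j < len(b) and b[j] == v:
--                 cb += 1
--                 j += 1
--             count += ca * cb
--     special = list1.count(list2[-1]) if list1 else 0
--     if count == 3:
--         return 5000
--     if count == 4:
--         return 50000
--     if special == 1 and count == 6:
--         return 50000000
--     if count == 5:
--         return 1000000
--     if count == 6:
--         return 1000000000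
--     return None
-- ===== Notes on version B (the rewrite author's own statement) =====
-- stated objective: faster
-- what changed: Replaces A's nested O(n*m) double scan by sorting both lists and counting cross-matches in a single two-pointer merge pass that multiplies the sizes of equal-value blocks; special is list1.count(list2[-1]) guarded for empty list1.
import Mathlib
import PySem

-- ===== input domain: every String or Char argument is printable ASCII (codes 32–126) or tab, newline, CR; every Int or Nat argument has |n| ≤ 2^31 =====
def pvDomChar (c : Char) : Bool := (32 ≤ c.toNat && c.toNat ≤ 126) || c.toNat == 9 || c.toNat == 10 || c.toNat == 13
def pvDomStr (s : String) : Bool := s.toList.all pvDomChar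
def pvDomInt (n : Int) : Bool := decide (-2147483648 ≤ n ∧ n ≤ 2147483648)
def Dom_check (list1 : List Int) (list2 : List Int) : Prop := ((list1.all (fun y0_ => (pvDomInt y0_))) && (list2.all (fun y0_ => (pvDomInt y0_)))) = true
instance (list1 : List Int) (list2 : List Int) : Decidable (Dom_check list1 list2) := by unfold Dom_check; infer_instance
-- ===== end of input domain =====

-- B sorts both lists and counts cross-matches in one two-pointer merge pass over the sorted copies (O(n log n + m log m) vs A's nested O(n*m) scan).


-- ===== PORT A =====
-- literal port: nested loop count, then the special loop over list2[-1]
-- (list2[-1] is total only under Pre_check; .getD 0 is never reached there: when list1 = [] the loop body never runs)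
def check (list1 : List Int) (list2 : List Int) : Option Int :=
  let count : Int := list1.foldl (fun c i => list2.foldl (fun c j => if i == j then c + 1 else c) c) 0
  let last : Int := (PySem.List.pyGet? list2 (-1)).getD 0
  let special : Int := list1.foldl (fun s i => if i == last then s + 1 else s) 0
  if count == 3 then some 5000
  else if count == 4 then some 50000
  else if special == 1 && count == 6 then some 50000000
  else if count == 5 then some 1000000
  else if count == 6 then some 1000000000
  else none

-- ===== PORT B =====
-- Source B's inner block-counting while loops: consume the leading run of v, returning (run length, rest)
def takeRun (v : Int) : List Int → Nat × List Int
  | [] => (0, [])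
  | x :: xs => if x == v then ((takeRun v xs).1 + 1, (takeRun v xs).2) else (0, x :: xs)

theorem takeRun_len_le (v : Int) (l : List Int) : (takeRun v l).2.length ≤ l.length := by
  induction l with
  | nil => simp [takeRun]
  | cons x xs ih =>
    by_cases h : x == v
    · simp [takeRun, h]; omega
    · simp [takeRun, h]

-- Source B's outer two-pointer while loop as recursion on the two (sorted) lists
def mergeCount : List Int → List Int → Int
  | [], _ => 0
  | _ :: _, [] => 0
  | x :: xs, y :: ys =>
    if x < y then mergeCount xs (y :: ys)
    else if y < x then mergeCount (x :: xs) ys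
    else
      (((takeRun x (x :: xs)).1 : Int)) * ((takeRun x (y :: ys)).1 : Int)
        + mergeCount (takeRun x (x :: xs)).2 (takeRun x (y :: ys)).2
termination_by a b => a.length + b.length
decreasing_by
  · simp
  · simp
  · have h1 := takeRun_len_le x xs
    have h2 := takeRun_len_le x ys
    have hyx : (y == x) = true := by simp; omega
    simp only [takeRun, beq_self_eq_true, if_true, hyx]
    simp only [List.length_cons]
    omega

def check_alt (list1 : List Int) (list2 : List Int) : Option Int :=
  let a := PySem.List.sorted list1 (fun x => x) false
  let b := PySem.List.sorted list2 (fun x => x) false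
  let count : Int := mergeCount a b
  let special : Int :=
    if list1 = [] then 0
    else (PySem.List.count list1 ((PySem.List.pyGet? list2 (-1)).getD 0) : Int)
  if count == 3 then some 5000
  else if count == 4 then some 50000
  else if special == 1 && count == 6 then some 50000000
  else if count == 5 then some 1000000
  else if count == 6 then some 1000000000
  else none

-- ===== PRECONDITION & SPEC =====
-- Pre_ excludes exactly the inputs where A raises IndexError: list1 non-empty with list2 empty
-- (the second loop evaluates list2[-1]); B raises there too.
def Pre_check (list1 : List Int) (list2 : List Int) : Prop := list1 = [] ∨ list2 ≠ []
instance (list1 : List Int) (list2 : List Int) : Decidable (Pre_check list1 list2) := by unfold Pre_check; infer_instance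
def pvWitness_check : List Int × List Int := ([1, 2, 3], [3, 2, 9])
def Spec_check (list1 : List Int) (list2 : List Int) (out : Option Int) : Prop := out = check_alt list1 list2
instance (list1 : List Int) (list2 : List Int) (out : Option Int) : Decidable (Spec_check list1 list2 out) := by unfold Spec_check; infer_instance

-- ===== CLAIM (what is proved, stated in full; the proofs are below) =====
def Claim_equal_check : Prop := ∀ (list1 : List Int) (list2 : List Int), Dom_check list1 list2 → Pre_check list1 list2 → Spec_check list1 list2 (check list1 list2)

-- ===== LEMMAS AND PROOFS =====

-- A's inner scan over list2 is the multiplicity of i in list2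
theorem inner_count (i : Int) (l : List Int) (c : Int) :
    l.foldl (fun c j => if i == j then c + 1 else c) c = c + (l.count i : Int) := by
  have : (fun (c : Int) (j : Int) => if i == j then c + 1 else c)
       = (fun (c : Int) (j : Int) => if j == i then c + 1 else c) := by
    funext c j; simp [BEq.comm]
  rw [this, PySem.List.foldl_beq_add_one]

-- A's special loop is list1.count last
theorem special_count (l : List Int) (v : Int) :
    l.foldl (fun s i => if i == v then s + 1 else s) (0 : Int) = (l.count v : Int) := by
  simpa using PySem.List.foldl_beq_add_one (l := l) (v := v) (a := (0 : Int))

-- takeRun on a sorted list with v ≤ everything splits off exactly the copies of v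
theorem takeRun_spec (v : Int) (l : List Int) (hle : ∀ z ∈ l, v ≤ z) :
    l = List.replicate (takeRun v l).1 v ++ (takeRun v l).2 ∧
    (l.Pairwise (· ≤ ·) → ∀ z ∈ (takeRun v l).2, v < z) := by
  induction l with
  | nil => simp [takeRun]
  | cons x xs ih =>
    by_cases h : x = v
    · subst h
      have hle' : ∀ z ∈ xs, x ≤ z := fun z hz => hle z (List.mem_cons_of_mem _ hz)
      obtain ⟨h1, h2⟩ := ih hle'
      constructor
      · simp only [takeRun, beq_self_eq_true, if_true]
        rw [List.replicate_succ, List.cons_append]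
        exact congrArg _ h1
      · intro hs
        simp only [takeRun, beq_self_eq_true, if_true]
        exact h2 hs.of_cons
    · have hbeq : (x == v) = false := by simp [BEq.comm]; omega
      constructor
      · simp [takeRun, hbeq]
      · intro hs z hz
        simp only [takeRun, hbeq, Bool.false_eq_true, if_false] at hz
        have hvx : v < x := lt_of_le_of_ne (hle x (List.mem_cons_self)) (fun e => h e.symm)
        rcases List.mem_cons.mp hz with rfl | hz'
        · exact hvx
        · exact lt_of_lt_of_le hvx ((List.pairwise_cons.mp hs).1 z hz')

-- the merge pass on sorted lists computes the cross-match count Σ_{i∈a} b.count i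
theorem mergeCount_sum : ∀ (n : Nat) (a b : List Int), a.length + b.length ≤ n →
    a.Pairwise (· ≤ ·) → b.Pairwise (· ≤ ·) →
    mergeCount a b = (a.map (fun i => (b.count i : Int))).sum := by
  intro n
  induction n with
  | zero =>
    intro a b hlen _ _
    have ha : a = [] := List.eq_nil_of_length_eq_zero (by omega)
    subst ha; simp [mergeCount]
  | succ n ih =>
    intro a b hlen ha hb
    match a, b with
    | [], _ => simp [mergeCount]
    | x :: xs, [] => simp [mergeCount]
    | x :: xs, y :: ys =>
      rcases lt_trichotomy x y with hlt | heq | hgt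
      · -- x < y: x occurs nowhere in y::ys
        have hcx : (y :: ys).count x = 0 := by
          rw [List.count_eq_zero]
          intro hx
          rcases List.mem_cons.mp hx with rfl | hx'
          · exact absurd hlt (lt_irrefl x)
          · exact absurd (lt_of_lt_of_le hlt ((List.pairwise_cons.mp hb).1 x hx')) (lt_irrefl x)
        have hrec := ih xs (y :: ys) (by simp at hlen ⊢; omega) ha.of_cons hb
        simp only [mergeCount, if_pos hlt]
        rw [hrec]
        simp [hcx]
      · -- x = y: strip the equal blocks
        subst heq
        have hlea : ∀ z ∈ x :: xs, x ≤ z := by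
          intro z hz
          rcases List.mem_cons.mp hz with rfl | hz'
          · exact le_refl z
          · exact (List.pairwise_cons.mp ha).1 z hz'
        have hleb : ∀ z ∈ x :: ys, x ≤ z := by
          intro z hz
          rcases List.mem_cons.mp hz with rfl | hz'
          · exact le_refl z
          · exact (List.pairwise_cons.mp hb).1 z hz'
        obtain ⟨hadec, hagt⟩ := takeRun_spec x (x :: xs) hlea
        obtain ⟨hbdec, hbgt⟩ := takeRun_spec x (x :: ys) hleb
        set ca := (takeRun x (x :: xs)).1 with hca
        set ra := (takeRun x (x :: xs)).2 with hra
        set cb := (takeRun x (x :: ys)).1 with hcb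
        set rb := (takeRun x (x :: ys)).2 with hrb
        have hagt' := hagt ha
        have hbgt' := hbgt hb
        have hpa : ra.Pairwise (· ≤ ·) := by
          rw [hadec] at ha; exact (List.pairwise_append.mp ha).2.1
        have hpb : rb.Pairwise (· ≤ ·) := by
          rw [hbdec] at hb; exact (List.pairwise_append.mp hb).2.1
        have hca1 : 1 ≤ ca := by
          rw [hca]; simp only [takeRun, beq_self_eq_true, if_true]; omega
        have hcb1 : 1 ≤ cb := by
          rw [hcb]; simp only [takeRun, beq_self_eq_true, if_true]; omega
        have hlena : (x :: xs).length = ca + ra.length := by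
          rw [hadec]; simp
        have hlenb : (x :: ys).length = cb + rb.length := by
          rw [hbdec]; simp
        have hrec := ih ra rb (by omega) hpa hpb
        -- the count of x in x::ys is cb, and of any i ∈ ra it is rb.count i
        have hcntx : ((x :: ys).count x : Int) = (cb : Int) := by
          conv_lhs => rw [hbdec]
          rw [List.count_append, List.count_replicate]
          have : rb.count x = 0 := by
            rw [List.count_eq_zero]; intro hx; exact absurd (hbgt' x hx) (lt_irrefl x)
          simp [this]
        have hcnt : ∀ i ∈ ra, ((x :: ys).count i : Int) = (rb.count i : Int) := by
          intro i hi
          conv_lhs => rw [hbdec]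
          rw [List.count_append, List.count_replicate]
          have hne : ¬ i = x := fun e => absurd (hagt' i hi) (by rw [e]; exact lt_irrefl x)
          have hne' : ¬ x = i := fun e => hne e.symm
          simp [hne']
        simp only [mergeCount, lt_irrefl, if_false, ← hca, ← hra, ← hcb, ← hrb]
        rw [hrec]
        conv_rhs => rw [hadec]
        rw [List.map_append, List.sum_append, List.map_replicate, List.sum_replicate,
            hcntx, List.map_congr_left hcnt]
        simp
      · -- y < x: y occurs nowhere in x::xs, so each i there counts the same in ys
        have hcnt : ∀ i ∈ x :: xs, ((y :: ys).count i : Int) = (ys.count i : Int) := by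
          intro i hi
          have hxi : x ≤ i := by
            rcases List.mem_cons.mp hi with rfl | hi'
            · exact le_refl i
            · exact (List.pairwise_cons.mp ha).1 i hi'
          have hne : ¬ i = y := fun e => absurd (lt_of_lt_of_le hgt hxi) (by rw [e]; exact lt_irrefl y)
          have hne' : ¬ y = i := fun e => hne e.symm
          rw [List.count_cons]
          simp [hne']
        have hrec := ih (x :: xs) ys (by simp at hlen ⊢; omega) ha hb.of_cons
        simp only [mergeCount, if_neg (not_lt_of_gt hgt), if_pos hgt]
        rw [hrec, List.map_congr_left hcnt]

-- A's nested double loop equals the cross-match sum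
theorem a_count_sum (list1 list2 : List Int) :
    list1.foldl (fun c i => list2.foldl (fun c j => if i == j then c + 1 else c) c) 0
      = (list1.map (fun i => (list2.count i : Int))).sum := by
  have hfun : (fun (c : Int) (i : Int) => list2.foldl (fun c j => if i == j then c + 1 else c) c)
      = (fun (c : Int) (i : Int) => c + (list2.count i : Int)) := by
    funext c i; rw [inner_count]
  rw [hfun, PySem.List.foldl_add]
  simp

-- ===== VERDICT (by name: the statement is the Claim_ definition above) =====
theorem check_spec : Claim_equal_check := by
  intro list1 list2 _ hpre
  unfold Spec_check check check_alt
  have hpa := PySem.List.sorted_perm (xs := list1) (key := fun x : Int => x) (rev := false)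
  have hpb := PySem.List.sorted_perm (xs := list2) (key := fun x : Int => x) (rev := false)
  have hsa : (PySem.List.sorted list1 (fun x => x) false).Pairwise (· ≤ ·) := by
    simpa using PySem.List.sorted_pairwise (xs := list1) (key := fun x : Int => x)
  have hsb : (PySem.List.sorted list2 (fun x => x) false).Pairwise (· ≤ ·) := by
    simpa using PySem.List.sorted_pairwise (xs := list2) (key := fun x : Int => x)
  have hcount :
      list1.foldl (fun c i => list2.foldl (fun c j => if i == j then c + 1 else c) c) 0
        = mergeCount (PySem.List.sorted list1 (fun x => x) false)
                     (PySem.List.sorted list2 (fun x => x) false) := by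
    rw [a_count_sum, mergeCount_sum ((PySem.List.sorted list1 (fun x => x) false).length
          + (PySem.List.sorted list2 (fun x => x) false).length) _ _ (le_refl _) hsa hsb]
    have hfun : (fun i : Int => ((PySem.List.sorted list2 (fun x => x) false).count i : Int))
        = (fun i : Int => (list2.count i : Int)) := by
      funext i; rw [hpb.count_eq]
    rw [hfun]
    exact ((hpa.map (fun i : Int => (list2.count i : Int))).sum_eq).symm
  have hspecial :
      list1.foldl (fun s i => if i == (PySem.List.pyGet? list2 (-1)).getD 0 then s + 1 else s) (0 : Int)
        = (if list1 = [] then (0 : Int)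
           else (PySem.List.count list1 ((PySem.List.pyGet? list2 (-1)).getD 0) : Int)) := by
    rw [special_count]
    cases list1 with
    | nil => simp
    | cons x xs => simp [PySem.List.count]
  simp only [hcount, hspecial]
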